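-- pv_equiv track=rewrite | github.com/apappas16/CSE515_Project | phase3_task5.py | filterGestureByName
-- ===== SOURCE A (Python) =====
-- def filterGestureByName(labeled_gest_list, labels):
--     vattene_list = []
--     combinato_list = []
--     daccordo_list = []
--     for file, label in zip(labeled_gest_list, labels):
--         if label == "vattene":
--             vattene_list.append(file)
--         elif label == "combinato":
--             combinato_list.append(file)
--         elif label == "daccordo":
--             daccordo_list.append(file)
--     return vattene_list, combinato_list, daccordo_list
-- ===== SOURCE B (Python) =====
-- def filterGestureByName(labeled_gest_list, labels):
--     pairs = list(zip(labeled_gest_list, labels))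
--     vattene_list = [f for f, l in pairs if l == "vattene"]
--     combinato_list = [f for f, l in pairs if l == "combinato"]
--     daccordo_list = [f for f, l in pairs if l == "daccordo"]
--     return vattene_list, combinato_list, daccordo_list
-- ===== Notes on version B (the rewrite author's own statement) =====
-- stated objective: simpler
-- what changed: Replaces the single branching loop with three accumulators by three independent per-label filtering passes over the zipped pairs.
import Mathlib
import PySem

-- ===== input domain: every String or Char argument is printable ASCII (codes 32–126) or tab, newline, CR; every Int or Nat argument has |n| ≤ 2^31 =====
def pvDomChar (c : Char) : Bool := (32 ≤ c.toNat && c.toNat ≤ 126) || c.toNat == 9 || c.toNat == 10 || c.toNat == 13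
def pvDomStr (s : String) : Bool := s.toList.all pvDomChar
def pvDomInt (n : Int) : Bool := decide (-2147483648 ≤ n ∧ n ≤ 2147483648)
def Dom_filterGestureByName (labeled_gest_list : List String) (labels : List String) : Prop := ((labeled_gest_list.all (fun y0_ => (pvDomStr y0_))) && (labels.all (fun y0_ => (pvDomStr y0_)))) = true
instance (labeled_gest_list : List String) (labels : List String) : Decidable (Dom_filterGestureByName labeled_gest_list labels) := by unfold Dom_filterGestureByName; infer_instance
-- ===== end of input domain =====

-- B partitions by three independent per-label filtering passes instead of A's single branching loop (objective: simpler).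

-- ===== PORT A =====
-- one pass over the zipped pairs, three accumulators, if/elif chain
def filterGestureByName (labeled_gest_list : List String) (labels : List String) : List String × List String × List String :=
  let r := (labeled_gest_list.zip labels).foldl
    (fun (acc : List String × List String × List String) fl =>
      if fl.2 = "vattene" then (acc.1 ++ [fl.1], acc.2.1, acc.2.2)
      else if fl.2 = "combinato" then (acc.1, acc.2.1 ++ [fl.1], acc.2.2)
      else if fl.2 = "daccordo" then (acc.1, acc.2.1, acc.2.2 ++ [fl.1])
      else acc)
    ([], [], [])
  r

-- ===== PORT B =====
-- three independent filtering passes over the zipped pairs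
def filterGestureByName_alt (labeled_gest_list : List String) (labels : List String) : List String × List String × List String :=
  let pairs := labeled_gest_list.zip labels
  ((pairs.filter (fun fl => fl.2 = "vattene")).map Prod.fst,
   (pairs.filter (fun fl => fl.2 = "combinato")).map Prod.fst,
   (pairs.filter (fun fl => fl.2 = "daccordo")).map Prod.fst)

-- ===== PRECONDITION & SPEC =====
def Spec_filterGestureByName (labeled_gest_list : List String) (labels : List String) (out : List String × List String × List String) : Prop := out = filterGestureByName_alt labeled_gest_list labels
instance (labeled_gest_list : List String) (labels : List String) (out : List String × List String × List String) : Decidable (Spec_filterGestureByName labeled_gest_list labels out) := by unfold Spec_filterGestureByName; infer_instance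

-- ===== CLAIM (what is proved, stated in full; the proofs are below) =====
def Claim_equal_filterGestureByName : Prop := ∀ (labeled_gest_list : List String) (labels : List String), Dom_filterGestureByName labeled_gest_list labels → Spec_filterGestureByName labeled_gest_list labels (filterGestureByName labeled_gest_list labels)

-- ===== LEMMAS AND PROOFS =====
theorem fold_partition (ps : List (String × String)) (v c d : List String) :
    ps.foldl
      (fun (acc : List String × List String × List String) fl =>
        if fl.2 = "vattene" then (acc.1 ++ [fl.1], acc.2.1, acc.2.2)
        else if fl.2 = "combinato" then (acc.1, acc.2.1 ++ [fl.1], acc.2.2)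
        else if fl.2 = "daccordo" then (acc.1, acc.2.1, acc.2.2 ++ [fl.1])
        else acc)
      (v, c, d)
    = (v ++ (ps.filter (fun fl => fl.2 = "vattene")).map Prod.fst,
       c ++ (ps.filter (fun fl => fl.2 = "combinato")).map Prod.fst,
       d ++ (ps.filter (fun fl => fl.2 = "daccordo")).map Prod.fst) := by
  induction ps generalizing v c d with
  | nil => simp
  | cons hd tl ih =>
    simp only [List.foldl_cons, List.filter_cons]
    by_cases h1 : hd.2 = "vattene" <;> by_cases h2 : hd.2 = "combinato" <;>
      by_cases h3 : hd.2 = "daccordo" <;>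
      simp_all [ih, List.append_assoc]

-- ===== VERDICT (by name: the statement is the Claim_ definition above) =====
theorem filterGestureByName_spec : Claim_equal_filterGestureByName := by
  intro l ls _
  unfold Spec_filterGestureByName filterGestureByName filterGestureByName_alt
  simp [fold_partition]
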